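-- pv_equiv track=rewrite | github.com/LauroLn/CatBioSearch | app.py | buscar_gene_pkd1
-- ===== SOURCE A (Python) =====
-- def buscar_gene_pkd1(conteudo):
--     cabecalho = ''
--     sequencias = []
--     gene_encontrado = False
--
--     for linha in conteudo:
--         linha = linha.strip()
--         if linha.startswith('>'):  # Identifica o cabeçalho
--             if gene_encontrado:
--                 break
--             if 'PKD1' in linha:  # Verifica se é o gene PKD1
--                 cabecalho = linha
--                 gene_encontrado = True
--         elif gene_encontrado:
--             sequencias.append(linha)
--
--     if gene_encontrado:
--         return {
--             'cabecalho': cabecalho,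
--             'sequencia': ''.join(sequencias)
--         }
--     else:
--         return {"error": "Gene PKD1 não encontrado no arquivo .fasta"}
-- ===== SOURCE B (Python) =====
-- def buscar_gene_pkd1(conteudo):
--     # Phase 1: generic FASTA parse — build the full table of (header, sequence-lines) records.
--     registros = []
--     for linha in conteudo:
--         linha = linha.strip()
--         if linha.startswith('>'):
--             registros.append((linha, []))
--         elif registros:
--             registros[-1][1].append(linha)
--     # Phase 2: look the PKD1 gene up in the record table.
--     for cabecalho, linhas in registros:
--         if 'PKD1' in cabecalho:
--             return {'cabecalho': cabecalho, 'sequencia': ''.join(linhas)}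
--     return {"error": "Gene PKD1 não encontrado no arquivo .fasta"}
-- ===== Notes on version B (the rewrite author's own statement) =====
-- stated objective: alternative
-- what changed: B first parses the whole input into a table of FASTA (header, sequence-lines) records with a generic gene-agnostic parser, then looks PKD1 up in that table, instead of A's targeted early-exit flag-driven state machine that only tracks the PKD1 record.
import Mathlib
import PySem

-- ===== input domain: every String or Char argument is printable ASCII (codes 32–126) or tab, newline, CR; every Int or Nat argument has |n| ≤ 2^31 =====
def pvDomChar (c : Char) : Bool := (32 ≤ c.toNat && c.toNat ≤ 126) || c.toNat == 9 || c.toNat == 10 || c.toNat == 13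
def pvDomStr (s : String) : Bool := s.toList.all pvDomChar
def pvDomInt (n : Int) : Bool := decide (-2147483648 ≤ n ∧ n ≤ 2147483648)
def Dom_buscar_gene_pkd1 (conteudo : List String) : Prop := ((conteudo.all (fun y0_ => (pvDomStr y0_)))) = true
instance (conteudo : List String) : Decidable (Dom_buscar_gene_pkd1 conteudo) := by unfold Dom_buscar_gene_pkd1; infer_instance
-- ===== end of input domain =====

-- B parses the whole input into a table of FASTA records and then looks PKD1 up in it,
-- replacing A's early-exit flag-driven state machine (alternative decomposition; same value).

-- ===== PORT A =====
-- A's loop with early break: state (cabecalho, sequencias, gene_encontrado); 'break' returns the state.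
def pvALoop : List String → String → List String → Bool → String × List String × Bool
  | [], cab, seqs, found => (cab, seqs, found)
  | l :: rest, cab, seqs, found =>
    let linha := PySem.Str.strip l
    if PySem.Str.startswith linha ">" then
      if found then (cab, seqs, found)
      else if PySem.Str.isIn "PKD1" linha then pvALoop rest linha seqs true
      else pvALoop rest cab seqs found
    else if found then pvALoop rest cab (seqs ++ [linha]) found
    else pvALoop rest cab seqs found

def buscar_gene_pkd1 (conteudo : List String) : List (String × String) :=
  let r := pvALoop conteudo "" [] false
  if r.2.2 then [("cabecalho", r.1), ("sequencia", PySem.Str.join "" r.2.1)]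
  else [("error", "Gene PKD1 não encontrado no arquivo .fasta")]

-- ===== PORT B =====
-- Phase 1 step: a header opens a new record; otherwise the line is appended to the last record (if any).
def pvStep (registros : List (String × List String)) (linha : String) : List (String × List String) :=
  let s := PySem.Str.strip linha
  if PySem.Str.startswith s ">" then registros ++ [(s, [])]
  else if registros.isEmpty then registros
  else registros.dropLast ++ [((registros.getLastD ("", [])).1, (registros.getLastD ("", [])).2 ++ [s])]

def buscar_gene_pkd1_alt (conteudo : List String) : List (String × String) :=
  let registros := conteudo.foldl pvStep []
  -- Phase 2: first record whose header mentions PKD1.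
  match registros.find? (fun r => PySem.Str.isIn "PKD1" r.1) with
  | some (cab, linhas) => [("cabecalho", cab), ("sequencia", PySem.Str.join "" linhas)]
  | none => [("error", "Gene PKD1 não encontrado no arquivo .fasta")]

-- ===== PRECONDITION & SPEC =====
def Spec_buscar_gene_pkd1 (conteudo : List String) (out : List (String × String)) : Prop := out = buscar_gene_pkd1_alt conteudo
instance (conteudo : List String) (out : List (String × String)) : Decidable (Spec_buscar_gene_pkd1 conteudo out) := by unfold Spec_buscar_gene_pkd1; infer_instance

-- ===== CLAIM (what is proved, stated in full; the proofs are below) =====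
def Claim_equal_buscar_gene_pkd1 : Prop := ∀ (conteudo : List String), Dom_buscar_gene_pkd1 conteudo → Spec_buscar_gene_pkd1 conteudo (buscar_gene_pkd1 conteudo)

-- ===== LEMMAS AND PROOFS =====
-- Proof-only characterizations: first header containing PKD1 (with raw rest), and
-- stripped lines up to the next header.
def pvFindHeader : List String → Option (String × List String)
  | [] => none
  | l :: rest =>
    let s := PySem.Str.strip l
    if PySem.Str.startswith s ">" && PySem.Str.isIn "PKD1" s then some (s, rest)
    else pvFindHeader rest

def pvCollect : List String → List String
  | [] => []
  | l :: rest =>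
    let s := PySem.Str.strip l
    if PySem.Str.startswith s ">" then [] else s :: pvCollect rest

-- Recursive form of B's parser once a record (h, b) is open.
def pvParseRec : String → List String → List String → List (String × List String)
  | h, b, [] => [(h, b)]
  | h, b, l :: t =>
    let s := PySem.Str.strip l
    if PySem.Str.startswith s ">" then (h, b) :: pvParseRec s [] t
    else pvParseRec h (b ++ [s]) t

-- A-side: in the found state the loop only appends the collected lines.
theorem pvALoop_found (rest : List String) (cab : String) (seqs : List String) :
    pvALoop rest cab seqs true = (cab, seqs ++ pvCollect rest, true) := by
  induction rest generalizing seqs with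
  | nil => simp [pvALoop, pvCollect]
  | cons l t ih =>
    simp only [pvALoop, pvCollect]
    split_ifs with h
    · simp
    · simp [ih]

-- A-side: before the header is found, A's loop is locate-then-collect.
theorem pvALoop_search (rest : List String) (cab : String) :
    pvALoop rest cab [] false =
      match pvFindHeader rest with
      | none => (cab, [], false)
      | some (c, r) => (c, pvCollect r, true) := by
  induction rest generalizing cab with
  | nil => simp [pvALoop, pvFindHeader]
  | cons l t ih =>
    simp only [pvALoop, pvFindHeader]
    by_cases h1 : PySem.Chars.startswith (PySem.Chars.strip l.toList) ['>'] = true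
    · by_cases h2 : PySem.Chars.isIn ['P', 'K', 'D', '1'] (PySem.Chars.strip l.toList) = true
      · simp [h1, h2, pvALoop_found]
      · simp [h1, h2, ih]
    · simp [h1, ih]

-- B-side: the fold with a concat state is the recursive parser.
theorem pvStep_foldl_concat (xs : List String) (R : List (String × List String))
    (h : String) (b : List String) :
    List.foldl pvStep (R ++ [(h, b)]) xs = R ++ pvParseRec h b xs := by
  induction xs generalizing R h b with
  | nil => simp [pvParseRec]
  | cons l t ih =>
    by_cases h1 : PySem.Chars.startswith (PySem.Chars.strip l.toList) ['>'] = true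
    · have hstep : pvStep (R ++ [(h, b)]) l = (R ++ [(h, b)]) ++ [(PySem.Str.strip l, [])] := by
        simp [pvStep, h1]
      rw [List.foldl_cons, hstep, ih]
      simp [pvParseRec, h1]
    · have hstep : pvStep (R ++ [(h, b)]) l = R ++ [(h, b ++ [PySem.Str.strip l])] := by
        simp [pvStep, h1, List.dropLast_concat, List.getLastD_concat]
      rw [List.foldl_cons, hstep, ih]
      simp [pvParseRec, h1]

-- B-side: searching the parsed record table from an open record (h, b).
theorem pvFind_parseRec (xs : List String) (h : String) (b : List String) :
    List.find? (fun r => PySem.Str.isIn "PKD1" r.1) (pvParseRec h b xs) =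
      if PySem.Str.isIn "PKD1" h then some (h, b ++ pvCollect xs)
      else (pvFindHeader xs).map (fun p => (p.1, pvCollect p.2)) := by
  induction xs generalizing h b with
  | nil =>
    by_cases hp : PySem.Chars.isIn ['P','K','D','1'] h.toList = true
    · simp [pvParseRec, pvCollect, List.find?, hp]
    · simp [pvParseRec, pvCollect, pvFindHeader, List.find?, hp]
  | cons l t ih =>
    by_cases h1 : PySem.Chars.startswith (PySem.Chars.strip l.toList) ['>'] = true
    · rw [show pvParseRec h b (l :: t) = (h, b) :: pvParseRec (PySem.Str.strip l) [] t from by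
        simp [pvParseRec, h1]]
      by_cases hp : PySem.Chars.isIn ['P','K','D','1'] h.toList = true
      · simp [List.find?, hp, pvCollect, h1]
      · rw [List.find?_cons_of_neg (h := by simp [hp]), ih]
        by_cases h2 : PySem.Chars.isIn ['P','K','D','1'] (PySem.Chars.strip l.toList) = true
        · simp [pvFindHeader, pvCollect, h1, h2, hp]
        · simp [pvFindHeader, h1, h2, hp]
    · rw [show pvParseRec h b (l :: t) = pvParseRec h (b ++ [PySem.Str.strip l]) t from by
        simp [pvParseRec, h1], ih]
      by_cases hp : PySem.Chars.isIn ['P','K','D','1'] h.toList = true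
      · simp [hp, pvCollect, h1]
      · simp [hp, pvFindHeader, h1]

-- B-side: the whole pipeline equals locate-then-collect.
theorem pvAlt_char (conteudo : List String) :
    List.find? (fun r => PySem.Str.isIn "PKD1" r.1) (List.foldl pvStep [] conteudo) =
      (pvFindHeader conteudo).map (fun p => (p.1, pvCollect p.2)) := by
  induction conteudo with
  | nil => simp [pvFindHeader]
  | cons l t ih =>
    by_cases h1 : PySem.Chars.startswith (PySem.Chars.strip l.toList) ['>'] = true
    · have hstep : pvStep [] l = [] ++ [(PySem.Str.strip l, [])] := by simp [pvStep, h1]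
      rw [List.foldl_cons, hstep, pvStep_foldl_concat, List.nil_append, pvFind_parseRec]
      by_cases h2 : PySem.Chars.isIn ['P','K','D','1'] (PySem.Chars.strip l.toList) = true
      · simp [pvFindHeader, h1, h2]
      · simp [pvFindHeader, h1, h2]
    · have hstep : pvStep [] l = [] := by simp [pvStep, h1]
      rw [List.foldl_cons, hstep, ih]
      simp [pvFindHeader, h1]

-- ===== VERDICT (by name: the statement is the Claim_ definition above) =====
theorem buscar_gene_pkd1_spec : Claim_equal_buscar_gene_pkd1 := by
  intro conteudo _
  unfold Spec_buscar_gene_pkd1 buscar_gene_pkd1 buscar_gene_pkd1_alt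
  simp only [pvAlt_char, pvALoop_search]
  cases h : pvFindHeader conteudo with
  | none => simp
  | some p => simp
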